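-- pv_equiv track=rewrite | github.com/worldvisualizer/stuck-with-codes | algorithms/codejam/codejam2021/quali/cody_jamal.py | cody_jamal_list
-- ===== SOURCE A (Python) =====
-- def cody_jamal_list(x, y, cod_ja, i, cod_ja_list):
--     if i == len(cod_ja):
--         return cod_ja_list
--     for ch in cod_ja:
--         templist = []
--         for string in cod_ja_list:
--             if ch == '?':
--                 if string == '':
--                     templist.append(string + 'C')
--                     templist.append(string + 'J')
--                 elif string[-1] == 'C':
--                     templist.append(string + 'C')
--                 elif string[-1] == 'J':
--                     templist.append(string + 'J')
--             else:
--                 templist.append(string + ch)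
--         cod_ja_list = templist
--     return cod_ja_list
-- ===== SOURCE B (Python) =====
-- def cody_jamal_list(x, y, cod_ja, i, cod_ja_list):
--     if i == len(cod_ja):
--         return cod_ja_list
--     def expand(prefix, rest):
--         if not rest:
--             return [prefix]
--         ch, rs = rest[0], rest[1:]
--         if ch == '?':
--             if prefix == '':
--                 return expand(prefix + 'C', rs) + expand(prefix + 'J', rs)
--             elif prefix[-1] == 'C':
--                 return expand(prefix + 'C', rs)
--             elif prefix[-1] == 'J':
--                 return expand(prefix + 'J', rs)
--             else:
--                 return []
--         return expand(prefix + ch, rs)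
--     return [t for s in cod_ja_list for t in expand(s, cod_ja)]
-- ===== Notes on version B (the rewrite author's own statement) =====
-- stated objective: alternative
-- what changed: Replaces A's breadth-first column-by-column rebuild of the whole list (outer loop over characters, inner loop over all current strings) with an independent per-seed recursive DFS that expands one prefix through the pattern and concatenates each seed's results in order.
import Mathlib
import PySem

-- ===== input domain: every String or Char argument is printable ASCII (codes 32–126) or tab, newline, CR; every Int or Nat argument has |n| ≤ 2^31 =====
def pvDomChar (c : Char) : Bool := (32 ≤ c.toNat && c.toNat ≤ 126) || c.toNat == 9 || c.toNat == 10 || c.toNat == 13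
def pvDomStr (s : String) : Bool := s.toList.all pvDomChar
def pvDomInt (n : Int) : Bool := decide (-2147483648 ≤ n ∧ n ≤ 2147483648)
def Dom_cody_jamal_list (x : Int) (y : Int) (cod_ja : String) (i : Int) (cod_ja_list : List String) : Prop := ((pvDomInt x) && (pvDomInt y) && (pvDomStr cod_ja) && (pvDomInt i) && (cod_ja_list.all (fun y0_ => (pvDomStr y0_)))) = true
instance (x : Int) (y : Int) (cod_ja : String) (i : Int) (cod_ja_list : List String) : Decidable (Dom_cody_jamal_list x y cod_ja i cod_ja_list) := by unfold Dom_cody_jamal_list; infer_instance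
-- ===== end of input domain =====

-- B replaces A's column-by-column sweep of the whole list with a per-seed recursive DFS (objective: alternative decomposition, same cost).

-- ===== PORT A =====
-- literal port of A: outer loop over the characters of cod_ja, inner loop rebuilding templist
def cody_jamal_list (x : Int) (y : Int) (cod_ja : String) (i : Int) (cod_ja_list : List String) : List String :=
  if i = PySem.Str.len cod_ja then cod_ja_list
  else
    cod_ja.toList.foldl (fun acc ch =>
      acc.foldl (fun templist s =>
        if ch = '?' then
          if s = "" then templist ++ [s ++ "C"] ++ [s ++ "J"]
          else if PySem.Str.pyGet? s (-1) = some 'C' then templist ++ [s ++ "C"]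
          else if PySem.Str.pyGet? s (-1) = some 'J' then templist ++ [s ++ "J"]
          else templist
        else templist ++ [s ++ ch.toString]) []) cod_ja_list

-- ===== PORT B =====
-- B's DFS helper: expand one pref through the remaining characters
def cjExpand (pref : String) (rest : List Char) : List String :=
  match rest with
  | [] => [pref]
  | ch :: rs =>
    if ch = '?' then
      if pref = "" then cjExpand (pref ++ "C") rs ++ cjExpand (pref ++ "J") rs
      else if PySem.Str.pyGet? pref (-1) = some 'C' then cjExpand (pref ++ "C") rs
      else if PySem.Str.pyGet? pref (-1) = some 'J' then cjExpand (pref ++ "J") rs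
      else []
    else cjExpand (pref ++ ch.toString) rs

def cody_jamal_list_alt (x : Int) (y : Int) (cod_ja : String) (i : Int) (cod_ja_list : List String) : List String :=
  if i = PySem.Str.len cod_ja then cod_ja_list
  else cod_ja_list.flatMap (fun s => cjExpand s cod_ja.toList)

-- ===== PRECONDITION & SPEC =====
def Spec_cody_jamal_list (x : Int) (y : Int) (cod_ja : String) (i : Int) (cod_ja_list : List String) (out : List String) : Prop := out = cody_jamal_list_alt x y cod_ja i cod_ja_list
instance (x : Int) (y : Int) (cod_ja : String) (i : Int) (cod_ja_list : List String) (out : List String) : Decidable (Spec_cody_jamal_list x y cod_ja i cod_ja_list out) := by unfold Spec_cody_jamal_list; infer_instance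

-- ===== CLAIM (what is proved, stated in full; the proofs are below) =====
def Claim_equal_cody_jamal_list : Prop := ∀ (x : Int) (y : Int) (cod_ja : String) (i : Int) (cod_ja_list : List String), Dom_cody_jamal_list x y cod_ja i cod_ja_list → Spec_cody_jamal_list x y cod_ja i cod_ja_list (cody_jamal_list x y cod_ja i cod_ja_list)

-- ===== LEMMAS AND PROOFS =====

-- proof-side: the successors of one string under one character (A's inner branch as a list)
def cjStep (ch : Char) (s : String) : List String :=
  if ch = '?' then
    if s = "" then [s ++ "C", s ++ "J"]
    else if PySem.Str.pyGet? s (-1) = some 'C' then [s ++ "C"]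
    else if PySem.Str.pyGet? s (-1) = some 'J' then [s ++ "J"]
    else []
  else [s ++ ch.toString]

-- A's inner loop over the current list is exactly 'extend with cjStep'
theorem inner_eq_flatMap (ch : Char) (l : List String) :
    l.foldl (fun templist s =>
        if ch = '?' then
          if s = "" then templist ++ [s ++ "C"] ++ [s ++ "J"]
          else if PySem.Str.pyGet? s (-1) = some 'C' then templist ++ [s ++ "C"]
          else if PySem.Str.pyGet? s (-1) = some 'J' then templist ++ [s ++ "J"]
          else templist
        else templist ++ [s ++ ch.toString]) [] = l.flatMap (cjStep ch) := by
  have h : (fun (templist : List String) (s : String) =>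
        if ch = '?' then
          if s = "" then templist ++ [s ++ "C"] ++ [s ++ "J"]
          else if PySem.Str.pyGet? s (-1) = some 'C' then templist ++ [s ++ "C"]
          else if PySem.Str.pyGet? s (-1) = some 'J' then templist ++ [s ++ "J"]
          else templist
        else templist ++ [s ++ ch.toString])
      = fun templist s => templist ++ cjStep ch s := by
    funext templist s
    unfold cjStep
    split_ifs <;> simp
  rw [h, PySem.List.foldl_append_eq_flatMap]
  simp

-- B's DFS unfolds to one cjStep followed by the DFS on the rest
theorem cjExpand_cons (ch : Char) (rs : List Char) (s : String) :
    cjExpand s (ch :: rs) = (cjStep ch s).flatMap (fun t => cjExpand t rs) := by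
  conv_lhs => rw [cjExpand]
  unfold cjStep
  split_ifs <;> simp only [List.flatMap_cons, List.flatMap_nil, List.append_nil]

-- column sweep = concatenation of per-seed DFS results
theorem sweep_eq_dfs (cs : List Char) (l : List String) :
    cs.foldl (fun acc ch => acc.flatMap (cjStep ch)) l = l.flatMap (fun s => cjExpand s cs) := by
  induction cs generalizing l with
  | nil => simp [cjExpand]
  | cons ch rs ih =>
    simp only [List.foldl_cons, ih]
    rw [List.flatMap_assoc]
    simp [cjExpand_cons]

-- ===== VERDICT (by name: the statement is the Claim_ definition above) =====
theorem cody_jamal_list_spec : Claim_equal_cody_jamal_list := by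
  intro x y cod_ja i l _
  unfold Spec_cody_jamal_list cody_jamal_list cody_jamal_list_alt
  split_ifs with h
  · rfl
  · have hstep : (fun (acc : List String) (ch : Char) =>
          acc.foldl (fun templist s =>
            if ch = '?' then
              if s = "" then templist ++ [s ++ "C"] ++ [s ++ "J"]
              else if PySem.Str.pyGet? s (-1) = some 'C' then templist ++ [s ++ "C"]
              else if PySem.Str.pyGet? s (-1) = some 'J' then templist ++ [s ++ "J"]
              else templist
            else templist ++ [s ++ ch.toString]) [])
        = fun (acc : List String) (ch : Char) => acc.flatMap (cjStep ch) := by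
      funext acc ch
      exact inner_eq_flatMap ch acc
    rw [hstep, sweep_eq_dfs]
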